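-- pv_equiv track=rewrite | github.com/tisma95/articles | cosine-similarity/sentence-similarities-benchmark/nltk_similarity.py | getSentenceWords
-- ===== SOURCE A (Python) =====
-- from typing import List
-- from string import punctuation
--
-- def getSentenceWords(sentence: str) -> List[str]:
--     """
--         Name
--         -----
--         getSentenceWords
--
--         Parameters
--         ----------
--         :param sentence(required str): The target sentence.
--
--         Response
--         --------
--         List of words of the sentence without punctuations.
--
--         Example
--         -------
--         getSentenceWords("The cat eats the mouse.") => will return ["the", "cat", "eats", "the", "mouse"]
--     """
--     # Remove all punctations in sentence
--     filterSentence = sentence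
--     for puncLetter in punctuation:
--         if puncLetter in filterSentence:
--             filterSentence = filterSentence.replace(puncLetter, '')
--     # Remove the trailling space
--     filterSentence = filterSentence.rstrip()
--     # Get the unic word and return it
--     response = [word.lower() for word in filterSentence.split()]
--     return response
-- ===== SOURCE B (Python) =====
-- from typing import List
-- from string import punctuation
--
-- def getSentenceWords(sentence: str) -> List[str]:
--     # Tokenize first, then clean each token: keep only non-punctuation
--     # characters, lowercase, and drop tokens that clean down to nothing.
--     result = []
--     for word in sentence.split():
--         cleaned = ''.join(ch for ch in word if ch not in punctuation).lower()
--         if cleaned: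
--             result.append(cleaned)
--     return result
-- ===== Notes on version B (the rewrite author's own statement) =====
-- stated objective: alternative
-- what changed: B tokenizes first and cleans each word with a single per-character filter (dropping words that clean to empty), instead of A's 32 sequential whole-string scan-and-replace passes, one per punctuation character.
import Mathlib
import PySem

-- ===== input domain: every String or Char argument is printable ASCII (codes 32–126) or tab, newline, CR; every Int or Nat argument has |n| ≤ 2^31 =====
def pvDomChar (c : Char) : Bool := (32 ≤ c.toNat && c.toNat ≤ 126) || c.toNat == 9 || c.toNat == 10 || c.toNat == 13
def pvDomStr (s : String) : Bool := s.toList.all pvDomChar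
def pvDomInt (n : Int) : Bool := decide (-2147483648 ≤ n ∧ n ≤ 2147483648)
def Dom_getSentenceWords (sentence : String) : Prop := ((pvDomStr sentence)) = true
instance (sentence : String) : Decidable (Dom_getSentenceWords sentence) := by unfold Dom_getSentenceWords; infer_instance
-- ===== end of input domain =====

-- B tokenizes first and cleans each word with one per-character filter (dropping words that
-- clean to empty) instead of A's 32 sequential whole-string replace passes (objective: alternative).

-- string.punctuation
def pyPunct : List Char := "!\"#$%&'()*+,-./:;<=>?@[\\]^_`{|}~".toList

-- ===== PORT A =====
def getSentenceWords (sentence : String) : List String :=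
  let filterSentence := pyPunct.foldl
    (fun fs p =>
      if PySem.Str.isIn (String.ofList [p]) fs then PySem.Str.replace fs (String.ofList [p]) "" else fs)
    sentence
  let fs2 := PySem.Str.rstrip filterSentence
  (PySem.Str.split₀ fs2).map (fun w => PySem.Str.lower w)

-- ===== PORT B =====
def getSentenceWords_alt (sentence : String) : List String :=
  (PySem.Str.split₀ sentence).foldl
    (fun res w =>
      let cleaned := PySem.Str.lower (String.ofList (w.toList.filter (fun ch => !(pyPunct.contains ch))))
      if cleaned ≠ "" then res ++ [cleaned] else res)
    []

-- ===== PRECONDITION & SPEC =====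
def Spec_getSentenceWords (sentence : String) (out : List String) : Prop := out = getSentenceWords_alt sentence
instance (sentence : String) (out : List String) : Decidable (Spec_getSentenceWords sentence out) := by unfold Spec_getSentenceWords; infer_instance

-- ===== CLAIM (what is proved, stated in full; the proofs are below) =====
def Claim_equal_getSentenceWords : Prop := ∀ (sentence : String), Dom_getSentenceWords sentence → Spec_getSentenceWords sentence (getSentenceWords sentence)

-- ===== LEMMAS AND PROOFS =====

-- replacing a single character by the empty string is filtering it out
lemma replace_go_singleton (p : Char) (l : List Char) (fuel : Nat) (acc : List Char)
    (h : l.length ≤ fuel) :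
    PySem.Chars.replace.go [p] [] fuel l acc = acc.reverse ++ l.filter (fun c => !(c == p)) := by
  induction l generalizing fuel acc with
  | nil => cases fuel <;> simp [PySem.Chars.replace.go]
  | cons c t ih =>
    cases fuel with
    | zero => simp at h
    | succ f =>
      have hf : t.length ≤ f := by simpa using h
      by_cases hc : c = p
      · subst hc
        simp [PySem.Chars.replace.go, List.isPrefixOf, ih _ _ hf]
      · have : [p].isPrefixOf (c :: t) = false := by
          simp [List.isPrefixOf]; exact fun hh => (hc hh.symm).elim
        simp [PySem.Chars.replace.go, this, ih _ _ hf, hc]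

-- one iteration of A's loop ('if p in s: s = s.replace(p, "")') filters p out
lemma replace_step_filter (p : Char) (s : List Char) :
    (if PySem.Chars.isIn [p] s then PySem.Chars.replace s [p] [] else s)
      = s.filter (fun c => !(c == p)) := by
  by_cases hin : PySem.Chars.isIn [p] s = true
  · rw [if_pos hin]
    simp [PySem.Chars.replace]
    exact replace_go_singleton p s s.length [] le_rfl
  · rw [if_neg (by simpa using hin)]
    have hmem : p ∉ s := by
      have := PySem.Chars.isIn_eq_false_iff (sub := [p]) (s := s)
      intro hp
      exact (this.mp (by simpa using hin)) ((List.singleton_infix_iff p s).mpr hp)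
    symm
    refine List.filter_eq_self.mpr ?_
    intro a ha
    simp
    intro hae; exact hmem (hae ▸ ha)

-- A's whole loop over the punctuation characters filters them all out
lemma foldl_replace_filter (ps : List Char) (s : String) :
    (ps.foldl
      (fun fs p =>
        if PySem.Str.isIn (String.ofList [p]) fs then PySem.Str.replace fs (String.ofList [p]) "" else fs)
      s).toList = s.toList.filter (fun c => !(ps.contains c)) := by
  induction ps generalizing s with
  | nil => simp
  | cons p ps ih =>
    rw [List.foldl_cons, ih]
    have hstep : (if PySem.Str.isIn (String.ofList [p]) s then PySem.Str.replace s (String.ofList [p]) "" else s).toList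
        = s.toList.filter (fun c => !(c == p)) := by
      rw [← replace_step_filter p s.toList]
      by_cases h : PySem.Chars.isIn [p] s.toList = true <;> simp [h]
    rw [hstep, List.filter_filter]
    apply List.filter_congr
    intro c _
    by_cases hc : c = p <;> simp [hc]

-- split₀ of an all-whitespace string flushes nothing
lemma split₀_go_all_space (t : List Char) (acc : List (List Char))
    (h : ∀ c ∈ t, PySem.Chars.isspace c = true) :
    PySem.Chars.split₀.go t [] acc = acc.reverse := by
  induction t generalizing acc with
  | nil => simp [PySem.Chars.split₀.go]
  | cons c t ih =>
    have hc := h c (by simp)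
    simp [PySem.Chars.split₀.go, hc, ih _ (fun d hd => h d (by simp [hd]))]

-- trailing whitespace does not change split₀
lemma split₀_go_append_space (s t : List Char) (cur : List Char) (acc : List (List Char))
    (h : ∀ c ∈ t, PySem.Chars.isspace c = true) :
    PySem.Chars.split₀.go (s ++ t) cur acc = PySem.Chars.split₀.go s cur acc := by
  induction s generalizing cur acc with
  | nil =>
    simp only [List.nil_append]
    induction t generalizing acc with
    | nil => rfl
    | cons c t iht =>
      have hc := h c (by simp)
      have ht : ∀ d ∈ t, PySem.Chars.isspace d = true := fun d hd => h d (by simp [hd])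
      by_cases hcur : cur.isEmpty
      · simp [PySem.Chars.split₀.go, hc, hcur, split₀_go_all_space t _ ht]
      · simp [PySem.Chars.split₀.go, hc, hcur, split₀_go_all_space t _ ht]
  | cons c s ih =>
    by_cases hc : PySem.Chars.isspace c <;> by_cases hcur : cur.isEmpty <;>
      simp [PySem.Chars.split₀.go, hc, hcur, ih]

-- so A's rstrip is invisible to the subsequent split
lemma split₀_rstrip (s : List Char) :
    PySem.Chars.split₀ (PySem.Chars.rstrip s) = PySem.Chars.split₀ s := by
  have hdecomp : PySem.Chars.rstrip s ++ (List.takeWhile PySem.Chars.isspace s.reverse).reverse = s := by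
    rw [PySem.Chars.rstrip, ← List.reverse_append, List.takeWhile_append_dropWhile, List.reverse_reverse]
  have hws : ∀ c ∈ (List.takeWhile PySem.Chars.isspace s.reverse).reverse, PySem.Chars.isspace c = true := by
    intro c hc
    exact List.mem_takeWhile_imp (by simpa using hc)
  calc PySem.Chars.split₀ (PySem.Chars.rstrip s)
      = PySem.Chars.split₀.go (PySem.Chars.rstrip s ++ (List.takeWhile PySem.Chars.isspace s.reverse).reverse) [] [] := (split₀_go_append_space _ _ _ _ hws).symm
    _ = PySem.Chars.split₀ s := by rw [hdecomp]; rfl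

-- filtering out only non-whitespace characters commutes with word splitting
-- (words are filtered individually; words filtered to nothing disappear)
lemma split₀_go_filter (keep : Char → Bool)
    (hks : ∀ c, PySem.Chars.isspace c = true → keep c = true) :
    ∀ (s cur : List Char) (acc : List (List Char)),
    PySem.Chars.split₀.go (s.filter keep) (cur.filter keep)
        ((acc.map (List.filter keep)).filter (fun w => !w.isEmpty))
      = ((PySem.Chars.split₀.go s cur acc).map (List.filter keep)).filter (fun w => !w.isEmpty) := by
  intro s
  induction s with
  | nil =>
    intro cur acc
    by_cases hcur : cur.isEmpty
    · have : (cur.filter keep).isEmpty := by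
        rcases List.isEmpty_iff.mp hcur with rfl; simp
      simp [PySem.Chars.split₀.go, hcur, this]
    · by_cases hfc : (cur.filter keep).isEmpty
      · simp [PySem.Chars.split₀.go, hcur, List.filter_reverse, List.isEmpty_iff.mp hfc]
      · simp [PySem.Chars.split₀.go, hcur, hfc, List.filter_reverse]
  | cons c s ih =>
    intro cur acc
    by_cases hw : PySem.Chars.isspace c
    · have hk : keep c = true := hks c hw
      by_cases hcur : cur.isEmpty
      · have hfc : (cur.filter keep).isEmpty := by
          rcases List.isEmpty_iff.mp hcur with rfl; simp
        simpa [List.filter_cons, hk, PySem.Chars.split₀.go, hw, hcur, hfc] using ih [] acc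
      · by_cases hfc : (cur.filter keep).isEmpty
        · simpa [List.filter_cons, hk, PySem.Chars.split₀.go, hw, hcur, hfc,
                 List.filter_reverse, List.isEmpty_iff.mp hfc] using ih [] (cur.reverse :: acc)
        · simpa [List.filter_cons, hk, PySem.Chars.split₀.go, hw, hcur, hfc,
                 List.filter_reverse] using ih [] (cur.reverse :: acc)
    · by_cases hk : keep c
      · simpa [List.filter_cons, hk, PySem.Chars.split₀.go, hw] using ih (c :: cur) acc
      · simpa [List.filter_cons, hk, PySem.Chars.split₀.go, hw] using ih (c :: cur) acc

lemma split₀_filter (keep : Char → Bool)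
    (hks : ∀ c, PySem.Chars.isspace c = true → keep c = true) (s : List Char) :
    PySem.Chars.split₀ (s.filter keep)
      = ((PySem.Chars.split₀ s).map (List.filter keep)).filter (fun w => !w.isEmpty) := by
  simpa using split₀_go_filter keep hks s [] []

lemma lower_ofList_ne_empty_decide (L : List Char) :
    decide (PySem.Str.lower (String.ofList L) ≠ "") = !L.isEmpty := by
  by_cases he : L = []
  · subst he; simp [PySem.Str.lower, PySem.Chars.lower]
  · have hne : PySem.Str.lower (String.ofList L) ≠ "" := by
      intro hc
      have h2 := congrArg String.toList hc
      simp only [PySem.Str.toList_lower, String.toList_ofList] at h2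
      exact he (by simpa [PySem.Chars.lower, List.map_eq_nil_iff] using h2)
    simp [hne, List.isEmpty_iff, he]

-- ===== VERDICT (by name: the statement is the Claim_ definition above) =====
set_option maxRecDepth 4000 in
theorem getSentenceWords_spec : Claim_equal_getSentenceWords := by
  intro s _
  unfold Spec_getSentenceWords getSentenceWords getSentenceWords_alt
  dsimp only
  have hks : ∀ c, PySem.Chars.isspace c = true → (!(pyPunct.contains c)) = true := by
    have hb : pyPunct.all (fun c => !(PySem.Chars.isspace c)) = true := by rfl
    have hpunct : ∀ c ∈ pyPunct, PySem.Chars.isspace c = false := by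
      intro c hc
      simpa using List.all_eq_true.mp hb c hc
    intro c h
    simp only [Bool.not_eq_true']
    by_cases hm : c ∈ pyPunct
    · rw [hpunct c hm] at h; exact absurd h (by simp)
    · simpa using hm
  have hsplit : ∀ x : String, PySem.Str.split₀ x = (PySem.Chars.split₀ x.toList).map String.ofList :=
    fun _ => rfl
  have h1 : (PySem.Str.rstrip (pyPunct.foldl
      (fun fs p => if PySem.Str.isIn (String.ofList [p]) fs then PySem.Str.replace fs (String.ofList [p]) "" else fs)
      s)).toList = PySem.Chars.rstrip (s.toList.filter (fun ch => !(pyPunct.contains ch))) := by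
    rw [PySem.Str.toList_rstrip]
    exact congrArg _ (foldl_replace_filter pyPunct s)
  have hfun : (fun (res : List String) (w : String) =>
        let cleaned := PySem.Str.lower (String.ofList (w.toList.filter (fun ch => !(pyPunct.contains ch))))
        if cleaned ≠ "" then res ++ [cleaned] else res)
      = (fun res w =>
        if (fun w : String => decide (PySem.Str.lower (String.ofList (w.toList.filter (fun ch => !(pyPunct.contains ch)))) ≠ "")) w = true
        then res ++ [(fun w : String => PySem.Str.lower (String.ofList (w.toList.filter (fun ch => !(pyPunct.contains ch))))) w] else res) := by
    funext res w
    simp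
  rw [hsplit, hsplit, h1, split₀_rstrip, split₀_filter _ hks,
      hfun, PySem.List.foldl_append_if, List.nil_append]
  simp only [List.filter_map, List.map_map]
  have hQ : ∀ v ∈ PySem.Chars.split₀ s.toList,
      ((fun w : String => decide (PySem.Str.lower (String.ofList (w.toList.filter (fun ch => !(pyPunct.contains ch)))) ≠ "")) ∘ String.ofList) v
        = ((fun w : List Char => !w.isEmpty) ∘ List.filter (fun ch => !(pyPunct.contains ch))) v := by
    intro v _
    simp only [Function.comp_apply, String.toList_ofList]
    exact lower_ofList_ne_empty_decide _
  rw [List.filter_congr hQ]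
  apply List.map_congr_left
  intro v _
  simp
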